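-- pv_equiv track=rewrite | github.com/MarisGomez/intro-programacion | Parciales y Tp grupal/Repaso recuperatorio.py | sumatoria_hasta
-- ===== SOURCE A (Python) =====
-- def sumatoria_hasta(s: list[int], n: int) -> int:
--     sumatoria: int = 0
--     for e in s:
--         if not(e == n):
--             sumatoria += e
--         else:
--             break
--     return sumatoria
-- ===== SOURCE B (Python) =====
-- def sumatoria_hasta(s: list[int], n: int) -> int:
--     idx = s.index(n) if n in s else len(s)
--     return sum(s[:idx])
-- ===== Notes on version B (the rewrite author's own statement) =====
-- stated objective: alternative
-- what changed: Replaces the fused accumulate-with-break loop by a two-phase computation: locate the boundary index of the first occurrence of n (s.index/len), then sum the prefix slice before it.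
import Mathlib
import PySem

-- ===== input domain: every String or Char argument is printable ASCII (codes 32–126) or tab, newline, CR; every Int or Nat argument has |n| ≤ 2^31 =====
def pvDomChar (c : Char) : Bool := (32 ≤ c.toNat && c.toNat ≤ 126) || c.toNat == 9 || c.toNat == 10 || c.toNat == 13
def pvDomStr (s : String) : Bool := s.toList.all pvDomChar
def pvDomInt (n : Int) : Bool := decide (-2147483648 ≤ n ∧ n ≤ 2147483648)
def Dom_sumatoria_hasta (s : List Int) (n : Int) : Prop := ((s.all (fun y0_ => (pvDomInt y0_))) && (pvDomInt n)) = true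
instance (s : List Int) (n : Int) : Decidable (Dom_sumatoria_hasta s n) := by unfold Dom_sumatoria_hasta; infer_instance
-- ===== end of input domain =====

-- B splits A's fused accumulate-with-break loop into two phases: locate the boundary index of the first occurrence of n, then sum the prefix slice (objective: alternative decomposition).


-- ===== PORT A =====
-- the for-loop with break, carrying the accumulator 'sumatoria'
def sumatoriaGo (n : Int) : List Int → Int → Int
  | [], sumatoria => sumatoria
  | e :: rest, sumatoria =>
      if ¬(e == n) then sumatoriaGo n rest (sumatoria + e) else sumatoria

def sumatoria_hasta (s : List Int) (n : Int) : Int := sumatoriaGo n s 0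

-- ===== PORT B =====
-- idx = s.index(n) if n in s else len(s); return sum(s[:idx])
def sumatoria_hasta_alt (s : List Int) (n : Int) : Int :=
  let idx : Nat :=
    match PySem.List.index? s n with
    | some i => i
    | none => s.length
  (PySem.List.slice s none (some (idx : Int))).sum

-- ===== PRECONDITION & SPEC =====
def Spec_sumatoria_hasta (s : List Int) (n : Int) (out : Int) : Prop := out = sumatoria_hasta_alt s n
instance (s : List Int) (n : Int) (out : Int) : Decidable (Spec_sumatoria_hasta s n out) := by unfold Spec_sumatoria_hasta; infer_instance

-- ===== CLAIM (what is proved, stated in full; the proofs are below) =====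
def Claim_equal_sumatoria_hasta : Prop := ∀ (s : List Int) (n : Int), Dom_sumatoria_hasta s n → Spec_sumatoria_hasta s n (sumatoria_hasta s n)

-- ===== LEMMAS AND PROOFS =====

lemma alt_def (s : List Int) (n : Int) :
    sumatoria_hasta_alt s n =
      (s.take (match PySem.List.index? s n with
               | some i => i
               | none => s.length)).sum := by
  rw [sumatoria_hasta_alt, PySem.List.slice_to_natCast]

lemma alt_cons (x : Int) (xs : List Int) (n : Int) :
    sumatoria_hasta_alt (x :: xs) n =
      if x = n then 0 else x + sumatoria_hasta_alt xs n := by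
  by_cases h : x = n
  · subst h
    rw [alt_def, PySem.List.index?_cons_self, if_pos rfl]
    rfl
  · rw [alt_def, alt_def, PySem.List.index?_cons_of_ne xs h, if_neg h]
    cases hi : PySem.List.index? xs n with
    | none => simp [List.take_of_length_le]
    | some i => simp

lemma go_eq (n : Int) (s : List Int) (acc : Int) :
    sumatoriaGo n s acc = acc + sumatoria_hasta_alt s n := by
  induction s generalizing acc with
  | nil =>
      rw [sumatoriaGo, alt_def]
      simp [PySem.List.index?]
  | cons x xs ih =>
      rw [sumatoriaGo, alt_cons]
      by_cases h : x = n
      · simp [h]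
      · rw [if_pos (by simpa using h), if_neg h, ih]
        ring

-- ===== VERDICT (by name: the statement is the Claim_ definition above) =====
theorem sumatoria_hasta_spec : Claim_equal_sumatoria_hasta := by
  intro s n _
  unfold Spec_sumatoria_hasta sumatoria_hasta
  rw [go_eq]
  ring
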